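-- pv_equiv track=rewrite | github.com/sanakausar356/testgenie-epicroast-new | groomroom/core_vnext.py | compress_report
-- ===== SOURCE A (Python) =====
-- def compress_report(report: str, max_words: int) -> str:
--     """Compress report to meet word limit"""
--     # Simple compression by removing some sections
--     lines = report.split('\n')
--     compressed_lines = []
--     word_count = 0
--
--     for line in lines:
--         line_words = len(line.split())
--         if word_count + line_words <= max_words:
--             compressed_lines.append(line)
--             word_count += line_words
--         else:
--             break
--
--     return '\n'.join(compressed_lines)
-- ===== SOURCE B (Python) =====
-- from bisect import bisect_right
-- from itertools import accumulate
--
-- def compress_report(report: str, max_words: int) -> str: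
--     """Compress report to meet word limit"""
--     lines = report.split('\n')
--     cumulative = list(accumulate(len(line.split()) for line in lines))
--     count = bisect_right(cumulative, max_words)
--     return '\n'.join(lines[:count])
-- ===== Notes on version B (the rewrite author's own statement) =====
-- stated objective: alternative
-- what changed: Replaces the early-break accumulator loop with a prefix-sum table of per-line word counts plus a bisect_right binary search for the cut point, then joins a single slice.
import Mathlib
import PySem

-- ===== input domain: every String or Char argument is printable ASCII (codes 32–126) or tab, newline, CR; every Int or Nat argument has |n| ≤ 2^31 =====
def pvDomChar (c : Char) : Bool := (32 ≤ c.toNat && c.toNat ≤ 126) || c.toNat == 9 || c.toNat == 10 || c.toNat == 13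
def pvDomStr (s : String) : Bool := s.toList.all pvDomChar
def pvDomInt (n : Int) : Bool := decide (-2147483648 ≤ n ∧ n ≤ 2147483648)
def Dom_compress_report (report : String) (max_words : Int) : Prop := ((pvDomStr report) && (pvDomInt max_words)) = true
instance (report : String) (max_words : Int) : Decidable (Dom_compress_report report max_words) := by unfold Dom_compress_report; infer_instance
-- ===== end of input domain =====

-- B replaces A's early-break accumulator loop by a prefix-sum table of per-line
-- word counts plus a bisect_right search for the cut point (objective: alternative).

-- ===== PORT A =====
-- the 'for line in lines: … else: break' loop with its two accumulators
def compressLoopA (max_words : Int) (lines : List String) (acc : List String) (wc : Int) : List String :=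
  match lines with
  | [] => acc
  | l :: rest =>
    let line_words : Int := ((PySem.Str.split₀ l).length : Int)
    if wc + line_words ≤ max_words then
      compressLoopA max_words rest (acc ++ [l]) (wc + line_words)
    else acc

def compress_report (report : String) (max_words : Int) : String :=
  let lines := (PySem.Str.split? report "\n").getD []   -- sep = "\n" ≠ "" so split? is always some
  PySem.Str.join "\n" (compressLoopA max_words lines [] 0)

-- ===== PORT B =====
-- itertools.accumulate: running sums of counts starting from s
def cumAcc (counts : List Int) (s : Int) : List Int :=
  match counts with
  | [] => []
  | c :: rest => (s + c) :: cumAcc rest (s + c)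

-- bisect.bisect_right on a nondecreasing list = number of elements ≤ x
-- (cumAcc of nonnegative counts is nondecreasing; exact there)
def bisectRight (xs : List Int) (x : Int) : Nat := xs.countP (fun y => y ≤ x)

def compress_report_alt (report : String) (max_words : Int) : String :=
  let lines := (PySem.Str.split? report "\n").getD []   -- sep = "\n" ≠ "" so split? is always some
  let cumulative := cumAcc (lines.map (fun l => ((PySem.Str.split₀ l).length : Int))) 0
  let count := bisectRight cumulative max_words
  PySem.Str.join "\n" (PySem.List.slice lines none (some (count : Int)))

-- ===== PRECONDITION & SPEC =====
def Spec_compress_report (report : String) (max_words : Int) (out : String) : Prop := out = compress_report_alt report max_words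
instance (report : String) (max_words : Int) (out : String) : Decidable (Spec_compress_report report max_words out) := by unfold Spec_compress_report; infer_instance

-- ===== CLAIM (what is proved, stated in full; the proofs are below) =====
def Claim_equal_compress_report : Prop := ∀ (report : String) (max_words : Int), Dom_compress_report report max_words → Spec_compress_report report max_words (compress_report report max_words)

-- ===== LEMMAS AND PROOFS =====

-- every running sum over nonnegative counts is at least the start value
theorem cumAcc_ge (counts : List Int) (s : Int) (h : ∀ c ∈ counts, 0 ≤ c) :
    ∀ y ∈ cumAcc counts s, s ≤ y := by
  induction counts generalizing s with
  | nil => simp [cumAcc]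
  | cons c rest ih =>
    intro y hy
    simp only [cumAcc, List.mem_cons] at hy
    have hc : 0 ≤ c := h c (by simp)
    rcases hy with rfl | hy
    · omega
    · have := ih (s + c) (fun d hd => h d (by simp [hd])) y hy
      omega

-- the loop invariant: A's loop from word_count wc produces acc ++ the take
-- of the bisect count over the running sums started at wc
theorem compressLoopA_eq (m : Int) (lines : List String) :
    ∀ (acc : List String) (wc : Int),
      compressLoopA m lines acc wc =
        acc ++ lines.take
          (bisectRight (cumAcc (lines.map (fun l => ((PySem.Str.split₀ l).length : Int))) wc) m) := by
  induction lines with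
  | nil => intro acc wc; simp [compressLoopA, cumAcc, bisectRight]
  | cons l rest ih =>
    intro acc wc
    simp only [compressLoopA, List.map_cons, cumAcc, bisectRight, List.countP_cons]
    by_cases h : wc + ((PySem.Str.split₀ l).length : Int) ≤ m
    · simp only [decide_eq_true_eq, h, if_true]
      rw [ih]
      simp [bisectRight, List.take_succ_cons]
    · simp only [decide_eq_true_eq, h, if_false, Nat.add_zero]
      have hz : (List.countP (fun y => decide (y ≤ m))
          (cumAcc (rest.map (fun l => ((PySem.Str.split₀ l).length : Int)))
            (wc + ((PySem.Str.split₀ l).length : Int)))) = 0 := by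
        rw [List.countP_eq_zero]
        intro y hy
        have := cumAcc_ge _ _ (by intro c hc; simp at hc; obtain ⟨a, _, rfl⟩ := hc; positivity) y hy
        simp only [decide_eq_true_eq]
        omega
      simp [hz]

-- ===== VERDICT (by name: the statement is the Claim_ definition above) =====
theorem compress_report_spec : Claim_equal_compress_report := by
  intro report max_words _
  unfold Spec_compress_report compress_report compress_report_alt
  simp only [compressLoopA_eq, PySem.List.slice_to_natCast, List.nil_append]
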